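-- pv_equiv track=rewrite | github.com/jsokolowska/ner-text-classification | src/ner_classifier.py | _to_spacy_format
-- ===== SOURCE A (Python) =====
-- from typing import List, Tuple, Iterable
--
-- def _to_spacy_format(labeled_sentences: List[List[Tuple[str, str]]]):
--     json_data = []
--     for labeled_sentence in labeled_sentences:
--         entity_list = []
--         idx = 0
--         for token, label in labeled_sentence:
--             if label != 'O':
--                 entity_list.append((idx, idx + len(token), label))
--             idx += len(token) + 1
--
--         text = " ".join([word for (word, _) in labeled_sentence][:-1])
--         json_data.append((text, {"entities": entity_list}))
--     return json_data
-- ===== SOURCE B (Python) =====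
-- from typing import List, Tuple
--
-- def _spans(sentence):
--     # recursion on the sentence structure: spans of the tail are computed as if
--     # the tail started at offset 0, then the whole sub-result is shifted.
--     if not sentence:
--         return []
--     (token, label) = sentence[0]
--     shift = len(token) + 1
--     tail = [(s + shift, e + shift, l) for (s, e, l) in _spans(sentence[1:])]
--     head = [(0, len(token), label)] if label != 'O' else []
--     return head + tail
--
-- def _to_spacy_format(labeled_sentences: List[List[Tuple[str, str]]]):
--     return [(" ".join([w for (w, _) in sentence][:-1]),
--              {"entities": _spans(sentence)})
--             for sentence in labeled_sentences]
-- ===== Notes on version B (the rewrite author's own statement) =====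
-- stated objective: alternative
-- what changed: B replaces A's single left-to-right loop with a running offset counter by structural recursion: the tail's spans are computed as if the tail began at offset 0 and the whole sub-result is then shifted by len(head)+1, so no cumulative offset is ever maintained.
import Mathlib
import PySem

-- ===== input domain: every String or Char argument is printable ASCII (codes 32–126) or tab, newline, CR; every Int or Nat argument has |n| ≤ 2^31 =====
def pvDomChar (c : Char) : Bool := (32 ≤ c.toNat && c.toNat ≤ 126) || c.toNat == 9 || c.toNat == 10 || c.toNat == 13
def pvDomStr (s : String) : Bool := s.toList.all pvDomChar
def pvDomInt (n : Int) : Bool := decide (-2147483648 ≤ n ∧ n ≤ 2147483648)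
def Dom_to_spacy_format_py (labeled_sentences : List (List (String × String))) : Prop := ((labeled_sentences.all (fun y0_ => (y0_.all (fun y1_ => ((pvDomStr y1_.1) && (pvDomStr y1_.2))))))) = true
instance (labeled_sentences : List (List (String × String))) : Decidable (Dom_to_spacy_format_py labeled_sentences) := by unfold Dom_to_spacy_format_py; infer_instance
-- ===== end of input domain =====

-- ===== PORT A =====
-- B computes spans by structural recursion with whole-sub-result shifting instead of A's running-offset loop (alternative decomposition; the proved equivalence is about return values; neither program mutates its argument).
-- inner loop of A: walks the sentence keeping the running character offset idx, appending spans for non-'O' labels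
def pvAEntities : List (String × String) → Int → List (Int × Int × String) → List (Int × Int × String)
  | [], _, acc => acc
  | (token, label) :: rest, idx, acc =>
      pvAEntities rest (idx + PySem.Str.len token + 1)
        (if label ≠ "O" then acc ++ [(idx, idx + PySem.Str.len token, label)] else acc)

def to_spacy_format_py (labeled_sentences : List (List (String × String))) : List (String × (List (String × List (Int × Int × String)))) :=
  labeled_sentences.map (fun labeled_sentence =>
    let entity_list := pvAEntities labeled_sentence 0 []
    let text := PySem.Str.join " " (PySem.List.slice (labeled_sentence.map (fun p => p.1)) none (some (-1)))
    (text, [("entities", entity_list)]))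

-- ===== PORT B =====
-- the shift comprehension of Source B
def pvShift (d : Int) (es : List (Int × Int × String)) : List (Int × Int × String) :=
  es.map (fun x => (x.1 + d, x.2.1 + d, x.2.2))

-- _spans: recursion on structure; tail spans computed at offset 0 then shifted
def pvSpans : List (String × String) → List (Int × Int × String)
  | [] => []
  | (token, label) :: rest =>
      (if label ≠ "O" then [((0 : Int), PySem.Str.len token, label)] else [])
        ++ pvShift (PySem.Str.len token + 1) (pvSpans rest)

def to_spacy_format_py_alt (labeled_sentences : List (List (String × String))) : List (String × (List (String × List (Int × Int × String)))) :=
  labeled_sentences.map (fun sentence =>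
    (PySem.Str.join " " (PySem.List.slice (sentence.map (fun p => p.1)) none (some (-1))),
     [("entities", pvSpans sentence)]))

-- ===== PRECONDITION & SPEC =====
-- manual DecidableEq composition (automatic synthesis stops one nesting level short on this type)
def pvDec1 : DecidableEq (List (String × List (Int × Int × String))) := inferInstance
def pvDec2 : DecidableEq (List (String × List (String × List (Int × Int × String)))) :=
  @instDecidableEqList _ (@instDecidableEqProd _ _ _ pvDec1)
def Spec_to_spacy_format_py (labeled_sentences : List (List (String × String))) (out : List (String × (List (String × List (Int × Int × String))))) : Prop := out = to_spacy_format_py_alt labeled_sentences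
instance (labeled_sentences : List (List (String × String))) (out : List (String × (List (String × List (Int × Int × String))))) : Decidable (Spec_to_spacy_format_py labeled_sentences out) := by unfold Spec_to_spacy_format_py; exact pvDec2 _ _

-- ===== CLAIM (what is proved, stated in full; the proofs are below) =====
def Claim_equal_to_spacy_format_py : Prop := ∀ (labeled_sentences : List (List (String × String))), Dom_to_spacy_format_py labeled_sentences → Spec_to_spacy_format_py labeled_sentences (to_spacy_format_py labeled_sentences)

-- ===== LEMMAS AND PROOFS =====
lemma pvAEntities_eq (sent : List (String × String)) : ∀ (idx : Int) (acc : List (Int × Int × String)),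
    pvAEntities sent idx acc = acc ++ pvShift idx (pvSpans sent) := by
  induction sent with
  | nil => intro idx acc; simp [pvAEntities, pvSpans, pvShift]
  | cons hd tl ih =>
      intro idx acc
      obtain ⟨token, label⟩ := hd
      simp only [pvAEntities, pvSpans]
      rw [ih]
      by_cases h : label = "O" <;>
        simp [h, pvShift, List.map_map, Function.comp_def, add_comm, add_left_comm]

-- ===== VERDICT (by name: the statement is the Claim_ definition above) =====
theorem to_spacy_format_py_spec : Claim_equal_to_spacy_format_py := by
  intro ls _
  unfold Spec_to_spacy_format_py to_spacy_format_py to_spacy_format_py_alt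
  refine List.map_congr_left (fun sent _ => ?_)
  simp [pvAEntities_eq sent 0 [], pvShift]
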